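-- pv_equiv track=rewrite | github.com/amer7632/pyGPlates_examples | General_plate_reconstruction/plate_pairs.py | patch_links_between_polygon
-- ===== SOURCE A (Python) =====
-- def patch_links_between_polygon(moving_plate,uniq_rotation_pairs,uniq_plates_from_static_polygons):
--     # for a given plate id, find the next highest plate id in the hierarchy
--     # for which a geometry exists in the specified set of polygons
--     # the first entry in the returned list is always the input moving plate
--     plate_chain_list = [moving_plate]
--
--     fixed_plate = None
--     found_the_end = False
--     while not found_the_end:
--
--         # first, find the plate pair (from the rotation tree) for the input moving plate.
--         # Append the fixed plate to our list
--         for plate_pair in uniq_rotation_pairs: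
--             if plate_pair[0]==moving_plate:
--                 fixed_plate = plate_pair[1]
--                 plate_chain_list.append(fixed_plate)
--                 continue
--
--         # if fixed plate is still None, we didn't find a valid plate pair - exit
--         if fixed_plate is None:
--             found_the_end = True
--         # if fixed plate id has a valid geoemtry, we're done - exit
--         elif fixed_plate in uniq_plates_from_static_polygons:
--             found_the_end = True
--         # if fixed plate id doesn't have a valid id, set the fixed plate to be moving plate
--         # and start the loop again
--         else:
--             moving_plate = fixed_plate
--
--         # Note that this is important to stop infinite loop when the fixed plate becomes zero
--         # Not sure why the 'None' doesn't kick in?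
--         if fixed_plate==0:
--             break
--
--     return plate_chain_list
-- ===== SOURCE B (Python) =====
-- def patch_links_between_polygon(moving_plate, uniq_rotation_pairs, uniq_plates_from_static_polygons):
--     # Index all rotation pairs once (moving plate -> ordered list of fixed plates),
--     # then follow the chain by dictionary lookup instead of rescanning all pairs per step.
--     # A walk longer than the number of pairs must have revisited a plate (A would
--     # never terminate there), so the walk is bounded by len(pairs) + 1 steps.
--     succ = {}
--     for a, b in uniq_rotation_pairs:
--         succ.setdefault(a, []).append(b)
--     polys = set(uniq_plates_from_static_polygons)
--     chain = [moving_plate]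
--     m = moving_plate
--     for _ in range(len(uniq_rotation_pairs) + 1):
--         fixed_list = succ.get(m, [])
--         if not fixed_list:
--             break
--         chain += fixed_list
--         f = fixed_list[-1]
--         if f in polys or f == 0:
--             break
--         m = f
--     return chain
-- ===== Notes on version B (the rewrite author's own statement) =====
-- stated objective: alternative
-- what changed: B indexes all rotation pairs once into a dict (moving plate -> ordered list of fixed plates) plus a set of polygon ids, then follows the plate chain by dictionary lookup, instead of A's per-step rescan of the whole pair list with a stale fixed_plate carried across iterations; it trades a one-off indexing pass for the repeated scans.
import Mathlib
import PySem

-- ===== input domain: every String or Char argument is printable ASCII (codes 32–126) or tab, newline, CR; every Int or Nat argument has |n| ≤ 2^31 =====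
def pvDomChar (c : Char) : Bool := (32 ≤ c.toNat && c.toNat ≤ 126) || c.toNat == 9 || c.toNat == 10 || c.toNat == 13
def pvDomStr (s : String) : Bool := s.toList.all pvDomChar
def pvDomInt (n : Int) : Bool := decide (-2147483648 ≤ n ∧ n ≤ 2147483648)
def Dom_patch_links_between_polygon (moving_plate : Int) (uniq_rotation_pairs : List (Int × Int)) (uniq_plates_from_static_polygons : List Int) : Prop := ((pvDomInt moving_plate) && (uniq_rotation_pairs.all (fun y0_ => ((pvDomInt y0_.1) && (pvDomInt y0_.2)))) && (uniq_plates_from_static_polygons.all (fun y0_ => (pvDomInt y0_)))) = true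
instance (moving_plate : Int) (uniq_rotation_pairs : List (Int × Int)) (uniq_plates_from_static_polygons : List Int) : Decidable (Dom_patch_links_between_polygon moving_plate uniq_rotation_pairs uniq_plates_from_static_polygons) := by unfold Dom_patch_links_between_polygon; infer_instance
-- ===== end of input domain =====

-- B indexes the rotation pairs once into a dict (moving plate -> its fixed plates) and follows the
-- chain by dictionary lookup instead of A's per-step rescan; return values agree wherever A terminates.

-- ===== PORT A =====
-- A's while-loop can run forever (a chain that cycles, or that dead-ends after the first step while
-- the stale `fixed_plate` keeps the loop alive); the port carries fuel = |pairs| + 1, which is enough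
-- for every terminating run of A (each productive iteration consumes a distinct moving-plate key).
-- Where Python A
-- diverges nothing is claimed about Python A; the port simply returns the accumulated chain,
-- which is also what B returns there.
def pvALoop (uniq_rotation_pairs : List (Int × Int)) (uniq_plates_from_static_polygons : List Int) : Nat → Int → Option Int → List Int → List Int
  | 0, _, _, chain => chain
  | Nat.succ n, moving, fixed0, chain =>
    -- the inner `for plate_pair in uniq_rotation_pairs` loop: append every matching fixed plate
    let st := uniq_rotation_pairs.foldl
      (fun st p => if p.1 == moving then (some p.2, st.2 ++ [p.2]) else st) (fixed0, chain)
    match st.1 with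
    | none => st.2                                                   -- fixed_plate is None: exit
    | some f =>
      if uniq_plates_from_static_polygons.contains f then st.2       -- fixed plate has a geometry: exit
      else if f == 0 then st.2                                       -- the `if fixed_plate==0: break`
      else pvALoop uniq_rotation_pairs uniq_plates_from_static_polygons n f (some f) st.2

def patch_links_between_polygon (moving_plate : Int) (uniq_rotation_pairs : List (Int × Int)) (uniq_plates_from_static_polygons : List Int) : List Int :=
  pvALoop uniq_rotation_pairs uniq_plates_from_static_polygons (uniq_rotation_pairs.length + 1) moving_plate none [moving_plate]

-- ===== PORT B =====
def pvBLoop (succ : PySem.Dict Int (List Int)) (polys : PySem.Set Int) : Nat → Int → List Int → List Int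
  | 0, _, chain => chain
  | Nat.succ n, m, chain =>
    let lst := succ.getD m []                 -- fixed_list = succ.get(m, [])
    if lst = [] then chain                    -- if not fixed_list: break
    else
      let chain2 := chain ++ lst              -- chain += fixed_list
      let f := lst.getLastD 0                 -- f = fixed_list[-1]  (lst ≠ [] on this branch)
      if polys.contains f || f == 0 then chain2
      else pvBLoop succ polys n f chain2

def patch_links_between_polygon_alt (moving_plate : Int) (uniq_rotation_pairs : List (Int × Int)) (uniq_plates_from_static_polygons : List Int) : List Int :=
  -- succ.setdefault(a, []).append(b) for each pair
  let succ := uniq_rotation_pairs.foldl (fun d p => d.modify p.1 [] (· ++ [p.2])) PySem.Dict.empty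
  let polys := PySem.Set.ofList uniq_plates_from_static_polygons
  pvBLoop succ polys (uniq_rotation_pairs.length + 1) moving_plate [moving_plate]

-- ===== PRECONDITION & SPEC =====
-- A is total up to non-termination: on every input where Python A returns, the ports agree
-- unconditionally, so no Pre_ is declared.
def Spec_patch_links_between_polygon (moving_plate : Int) (uniq_rotation_pairs : List (Int × Int)) (uniq_plates_from_static_polygons : List Int) (out : List Int) : Prop := out = patch_links_between_polygon_alt moving_plate uniq_rotation_pairs uniq_plates_from_static_polygons
instance (moving_plate : Int) (uniq_rotation_pairs : List (Int × Int)) (uniq_plates_from_static_polygons : List Int) (out : List Int) : Decidable (Spec_patch_links_between_polygon moving_plate uniq_rotation_pairs uniq_plates_from_static_polygons out) := by unfold Spec_patch_links_between_polygon; infer_instance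

-- ===== CLAIM (what is proved, stated in full; the proofs are below) =====
def Claim_equal_patch_links_between_polygon : Prop := ∀ (moving_plate : Int) (uniq_rotation_pairs : List (Int × Int)) (uniq_plates_from_static_polygons : List Int), Dom_patch_links_between_polygon moving_plate uniq_rotation_pairs uniq_plates_from_static_polygons → Spec_patch_links_between_polygon moving_plate uniq_rotation_pairs uniq_plates_from_static_polygons (patch_links_between_polygon moving_plate uniq_rotation_pairs uniq_plates_from_static_polygons)

-- ===== LEMMAS AND PROOFS =====

-- the fixed plates matching a given moving plate, in pair order
def pvMts (uniq_rotation_pairs : List (Int × Int)) (m : Int) : List Int :=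
  (uniq_rotation_pairs.filter (fun p => p.1 == m)).map (·.2)

-- A's inner for-loop: appends exactly the matching fixed plates, fixed = last match (or unchanged)
theorem pvFoldInner (uniq_rotation_pairs : List (Int × Int)) (m : Int) (f0 : Option Int) (ch : List Int) :
    uniq_rotation_pairs.foldl (fun st p => if p.1 == m then (some p.2, st.2 ++ [p.2]) else st) (f0, ch)
      = ((pvMts uniq_rotation_pairs m).foldl (fun _ b => some b) f0, ch ++ pvMts uniq_rotation_pairs m) := by
  induction uniq_rotation_pairs generalizing f0 ch with
  | nil => simp [pvMts]
  | cons p rest ih =>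
    simp only [List.foldl_cons]
    cases h : (p.1 == m) with
    | false =>
      simp only [h, Bool.false_eq_true, if_false]
      rw [ih f0 ch]
      simp [pvMts, List.filter_cons, h]
    | true =>
      simp only [h, if_true]
      rw [ih (some p.2) (ch ++ [p.2])]
      simp [pvMts, List.filter_cons, h]

theorem pvLastFold (l : List Int) (a : Int) (f0 : Option Int) :
    (a :: l).foldl (fun _ b => some b) f0 = some ((a :: l).getLastD 0) := by
  induction l generalizing a f0 with
  | nil => rfl
  | cons b l ih => simpa [List.getLastD_cons] using ih b (some a)

theorem pvSuccGetD (uniq_rotation_pairs : List (Int × Int)) (m : Int) :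
    (uniq_rotation_pairs.foldl (fun d p => d.modify p.1 [] (· ++ [p.2])) PySem.Dict.empty).getD m []
      = pvMts uniq_rotation_pairs m := by
  simpa [pvMts] using
    PySem.Dict.getD_foldl_modify_append (l := uniq_rotation_pairs) (d := PySem.Dict.empty) (c := m)

-- when the moving plate has no matching pair, A's loop stalls on the stale fixed_plate and the
-- chain never changes: the loop just burns its remaining fuel and returns the chain unchanged
theorem pvStale (pairs : List (Int × Int)) (polys : List Int) (m : Int)
    (h : pvMts pairs m = []) : ∀ n ch, pvALoop pairs polys n m (some m) ch = ch := by
  intro n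
  induction n with
  | zero => intro ch; rfl
  | succ n ih =>
    intro ch
    simp only [pvALoop, pvFoldInner, h, List.foldl_nil, List.append_nil]
    split <;> simp [ih]

theorem pvMain (pairs : List (Int × Int)) (polys : List Int) :
    ∀ n m ch, pvALoop pairs polys n m (some m) ch
      = pvBLoop (pairs.foldl (fun d p => d.modify p.1 [] (· ++ [p.2])) PySem.Dict.empty)
          (PySem.Set.ofList polys) n m ch := by
  intro n
  induction n with
  | zero => intro m ch; rfl
  | succ n ih =>
    intro m ch
    rcases hm : pvMts pairs m with _ | ⟨a, l⟩
    · rw [pvStale pairs polys m hm]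
      simp [pvBLoop, pvSuccGetD, hm]
    · simp only [pvALoop, pvBLoop, pvFoldInner, pvSuccGetD, hm, pvLastFold]
      split <;> split <;> simp_all

theorem pvTop (pairs : List (Int × Int)) (polys : List Int) (n : Nat) (m : Int) (ch : List Int) :
    pvALoop pairs polys (n + 1) m none ch
      = pvBLoop (pairs.foldl (fun d p => d.modify p.1 [] (· ++ [p.2])) PySem.Dict.empty)
          (PySem.Set.ofList polys) (n + 1) m ch := by
  rcases hm : pvMts pairs m with _ | ⟨a, l⟩
  · simp only [pvALoop, pvBLoop, pvFoldInner]
    simp [hm, pvSuccGetD]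
  · simp only [pvALoop, pvBLoop, pvFoldInner, pvSuccGetD, hm, pvLastFold]
    split <;> split <;> simp_all [pvMain]

-- ===== VERDICT (by name: the statement is the Claim_ definition above) =====
theorem patch_links_between_polygon_spec : Claim_equal_patch_links_between_polygon := by
  intro m pairs polys _
  unfold Spec_patch_links_between_polygon patch_links_between_polygon patch_links_between_polygon_alt
  exact pvTop pairs polys pairs.length m [m]
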